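-- pv_equiv track=rewrite | github.com/PJ-NBA-472915/cage | src/cage/editor_tool.py | _apply_region_selector
-- ===== SOURCE A (Python) =====
-- from typing import Dict, List, Optional, Any, Union, Tuple
--
-- def _apply_region_selector(content: str, selector: Dict[str, Any]) -> Tuple[str, int, int]:
--     """Apply region selector to content."""
--     start_line = selector.get('start', 1)
--     end_line = selector.get('end', -1)
--
--     lines = content.splitlines(keepends=True)
--
--     # Convert to 0-based indexing
--     start_idx = max(0, start_line - 1)
--     if end_line == -1:
--         end_idx = len(lines)
--     else:
--         end_idx = min(end_line, len(lines))
--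
--     # Get the selected lines
--     selected_lines = lines[start_idx:end_idx]
--     selected_content = ''.join(selected_lines)
--
--     # Calculate character positions for the original content
--     char_start = sum(len(lines[i]) for i in range(start_idx))
--     char_end = char_start + len(selected_content)
--
--     return selected_content, char_start, char_end
-- ===== SOURCE B (Python) =====
-- def _apply_region_selector(content: str, selector) -> tuple:
--     """Apply region selector via a cumulative-offset prefix table and one string slice."""
--     start_line = selector.get('start', 1)
--     end_line = selector.get('end', -1)
--
--     lines = content.splitlines(keepends=True)
--     n = len(lines)
--
--     # prefix table: offsets[k] = length of the first k lines
--     offsets = [0]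
--     total = 0
--     for ln in lines:
--         total += len(ln)
--         offsets.append(total)
--
--     start_idx = max(0, start_line - 1)
--     # normalised (Python-slice) stop index
--     if end_line == -1:
--         end_idx = n
--     elif end_line < 0:
--         end_idx = max(0, n + end_line)
--     else:
--         end_idx = min(end_line, n)
--     end_idx = max(start_idx, end_idx)
--
--     char_start = offsets[start_idx]
--     char_end = offsets[end_idx]
--     return content[char_start:char_end], char_start, char_end
-- ===== Notes on version B (the rewrite author's own statement) =====
-- stated objective: alternative
-- what changed: B builds a cumulative-offset prefix table over the keepends-split lines and returns one slice of the original string at two table lookups, instead of A's join of the selected line list plus a generator-sum of leading line lengths.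
import Mathlib
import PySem

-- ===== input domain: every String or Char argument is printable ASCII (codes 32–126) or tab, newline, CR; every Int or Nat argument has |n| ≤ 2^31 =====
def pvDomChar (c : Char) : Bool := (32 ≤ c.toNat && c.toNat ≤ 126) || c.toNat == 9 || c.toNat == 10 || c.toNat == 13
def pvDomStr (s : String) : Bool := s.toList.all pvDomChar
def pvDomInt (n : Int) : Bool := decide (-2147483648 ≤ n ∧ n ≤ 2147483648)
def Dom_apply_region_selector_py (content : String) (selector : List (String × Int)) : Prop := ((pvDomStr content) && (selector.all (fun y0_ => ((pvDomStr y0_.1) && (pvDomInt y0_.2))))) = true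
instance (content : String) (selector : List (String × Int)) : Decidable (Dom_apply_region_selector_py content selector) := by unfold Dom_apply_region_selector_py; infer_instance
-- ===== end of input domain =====

-- B replaces A's per-call join of the selected lines and A's generator-sum of line lengths by one
-- cumulative-offset prefix table plus a single slice of the original string ('alternative' objective).

-- content.splitlines(keepends=True), ported by hand (PySem.Chars.splitlines drops the line endings).
-- Exact on the Dom_ character set, whose only line-break characters are '\n', '\r' and '\r\n'.
-- pvFirstLineK cs = (first line with its line ending kept, remaining characters).
def pvFirstLineK : List Char → List Char × List Char
  | [] => ([], [])
  | c :: rest =>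
    if c = '\n' then (['\n'], rest)
    else if c = '\r' then
      match rest with
      | '\n' :: r => (['\r', '\n'], r)
      | _ => (['\r'], rest)
    else
      let p := pvFirstLineK rest
      (c :: p.1, p.2)


-- needed by pvSplitlinesK's termination proof
theorem pvFirstLineK_snd_length : ∀ (cs : List Char), (pvFirstLineK cs).2.length ≤ cs.length
  | [] => Nat.le_refl _
  | c :: rest => by
    simp only [pvFirstLineK]
    split
    · simp
    · split
      · split
        · simp_all; omega
        · simp
      · have := pvFirstLineK_snd_length rest
        simp; omega


-- needed by pvSplitlinesK's termination proof
theorem pvFirstLineK_snd_lt (c : Char) (rest : List Char) :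
    (pvFirstLineK (c :: rest)).2.length < (c :: rest).length := by
  simp only [pvFirstLineK]
  split
  · simp
  · split
    · split
      · simp_all
      · simp
    · have := pvFirstLineK_snd_length rest
      simp; omega


def pvSplitlinesK : List Char → List (List Char)
  | [] => []
  | c :: rest =>
    let p := pvFirstLineK (c :: rest)
    p.1 :: pvSplitlinesK p.2
  termination_by cs => cs.length
  decreasing_by exact pvFirstLineK_snd_lt c rest


-- number of lines content.splitlines() yields: a closed-form line counter used only by Pre_
def pvNumLines : List Char → Nat
  | [] => 0
  | '\r' :: '\n' :: rest => 1 + pvNumLines rest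
  | '\r' :: rest => 1 + pvNumLines rest
  | '\n' :: rest => 1 + pvNumLines rest
  | _ :: rest => max 1 (pvNumLines rest)


-- ===== PORT A =====
def apply_region_selector_py (content : String) (selector : List (String × Int)) : String × Int × Int :=
  let start_line := PySem.Dict.getD ⟨selector⟩ "start" 1
  let end_line := PySem.Dict.getD ⟨selector⟩ "end" (-1)
  let lines := pvSplitlinesK content.toList
  let start_idx : Int := max 0 (start_line - 1)
  let end_idx : Int := if end_line = -1 then (lines.length : Int) else min end_line (lines.length : Int)
  let selected_lines := PySem.List.slice lines (some start_idx) (some end_idx)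
  let selected_content := PySem.Chars.join [] selected_lines
  -- sum(len(lines[i]) for i in range(start_idx)): Python raises IndexError when start_idx > len(lines);
  -- those inputs are excluded by Pre_, so the pyGetD default is never read inside the claim.
  let char_start : Int := ((PySem.List.pyRange 0 start_idx).map (fun i => ((PySem.List.pyGetD lines i []).length : Int))).sum
  let char_end : Int := char_start + selected_content.length
  (String.ofList selected_content, char_start, char_end)

-- ===== PORT B =====
def apply_region_selector_py_alt (content : String) (selector : List (String × Int)) : String × Int × Int :=
  let start_line := PySem.Dict.getD ⟨selector⟩ "start" 1
  let end_line := PySem.Dict.getD ⟨selector⟩ "end" (-1)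
  let lines := pvSplitlinesK content.toList
  let n := lines.length
  -- Source B's running-total loop: offsets[k] = length of the first k lines
  let offsets := (lines.foldl (fun (st : Nat × List Nat) ln => (st.1 + ln.length, st.2 ++ [st.1 + ln.length])) (0, [0])).2
  let start_idx : Nat := (max 0 (start_line - 1)).toNat
  -- normalised (Python-slice) stop index; .toNat is Python's max(0, ·) in the negative branch
  let end_idx : Nat :=
    if end_line = -1 then n
    else if end_line < 0 then ((n : Int) + end_line).toNat
    else (min end_line (n : Int)).toNat
  let end_idx2 := max start_idx end_idx
  -- offsets[start_idx]: Source B raises IndexError when start_idx > len(lines); excluded by Pre_.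
  let char_start := PySem.List.pyGetD offsets (start_idx : Int) 0
  let char_end := PySem.List.pyGetD offsets (end_idx2 : Int) 0
  let sel := PySem.List.slice content.toList (some (char_start : Int)) (some (char_end : Int))
  (String.ofList sel, (char_start : Int), (char_end : Int))

-- ===== PRECONDITION & SPEC =====
-- Pre_ excludes exactly the inputs where both Pythons raise IndexError: a 'start' value more than one
-- past the last line (A's sum then reads lines[start_idx - 1]; B reads offsets[start_idx]).
def Pre_apply_region_selector_py (content : String) (selector : List (String × Int)) : Prop :=
  PySem.Dict.getD ⟨selector⟩ "start" 1 - 1 ≤ ((pvNumLines content.toList : Nat) : Int)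
instance (content : String) (selector : List (String × Int)) : Decidable (Pre_apply_region_selector_py content selector) := by unfold Pre_apply_region_selector_py; infer_instance

def pvWitness_apply_region_selector_py : String × (List (String × Int)) :=
  ("a\nbb\nc", [("start", 2), ("end", 3)])

def Spec_apply_region_selector_py (content : String) (selector : List (String × Int)) (out : String × Int × Int) : Prop := out = apply_region_selector_py_alt content selector
instance (content : String) (selector : List (String × Int)) (out : String × Int × Int) : Decidable (Spec_apply_region_selector_py content selector out) := by unfold Spec_apply_region_selector_py; infer_instance

-- ===== CLAIM (what is proved, stated in full; the proofs are below) =====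
def Claim_equal_apply_region_selector_py : Prop := ∀ (content : String) (selector : List (String × Int)), Dom_apply_region_selector_py content selector → Pre_apply_region_selector_py content selector → Spec_apply_region_selector_py content selector (apply_region_selector_py content selector)

-- ===== LEMMAS AND PROOFS =====

-- the closed-form counter counts exactly the keepends-split lines
theorem pvNumLines_eq : ∀ (cs : List Char), pvNumLines cs = (pvSplitlinesK cs).length := by
  intro cs
  fun_induction pvNumLines cs with
  | case1 => simp [pvSplitlinesK]
  | case2 rest ih =>
    rw [pvSplitlinesK]
    simp [pvFirstLineK, ih]
    omega
  | case3 rest h ih =>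
    rw [pvSplitlinesK]
    simp only [pvFirstLineK]
    cases rest with
    | nil => simp [ih]; omega
    | cons b r =>
      simp [ih]
      omega
  | case4 rest ih =>
    rw [pvSplitlinesK]
    simp [pvFirstLineK, ih]
    omega
  | case5 c rest h1 h2 h3 ih =>
    rw [pvSplitlinesK]
    simp only [pvFirstLineK, if_neg h3, if_neg h2]
    cases rest with
    | nil =>
      simp [pvSplitlinesK, pvFirstLineK, pvNumLines]
    | cons b r =>
      rw [ih, pvSplitlinesK]
      simp

-- ''.join is flatten
theorem pv_join_nil_flatten (l : List (List Char)) : PySem.Chars.join [] l = l.flatten := by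
  induction l with
  | nil => rfl
  | cons a t ih =>
    cases t with
    | nil => simp [PySem.Chars.join, List.intercalate, List.intersperse]
    | cons b t2 =>
      rw [PySem.Chars.join_cons_cons, ih]
      simp


-- splitlines(keepends=True) concatenates back to the original characters
theorem pvFirstLineK_append (cs : List Char) : (pvFirstLineK cs).1 ++ (pvFirstLineK cs).2 = cs := by
  induction cs with
  | nil => rfl
  | cons c rest ih =>
    simp only [pvFirstLineK]
    split
    · simp_all
    · split
      · split
        · simp_all
        · simp_all
      · simpa using ih


theorem pvSplitlinesK_flatten (cs : List Char) : (pvSplitlinesK cs).flatten = cs := by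
  induction cs using pvSplitlinesK.induct with
  | case1 => simp [pvSplitlinesK]
  | case2 c rest p ih =>
    rw [pvSplitlinesK]
    simp only [List.flatten_cons]
    rw [ih]
    exact pvFirstLineK_append (c :: rest)


-- pvPref l k = total length of the first k lines
def pvPref (l : List (List Char)) (k : Nat) : Nat := ((l.take k).map List.length).sum


theorem pvPref_succ (l : List (List Char)) (k : Nat) (hk : k < l.length) :
    pvPref l (k + 1) = pvPref l k + (l.getD k []).length := by
  unfold pvPref
  rw [List.take_add, List.map_append, List.sum_append]
  have h1 : List.take 1 (List.drop k l) = [l.getD k []] := by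
    rw [List.getD_eq_getElem l [] hk, List.take_one]
    have : (List.drop k l).head? = some l[k] := by
      rw [List.head?_drop]
      simp [hk]
    simp [this]
  rw [h1]; simp


theorem pvPref_sub (l : List (List Char)) (a b : Nat) (hab : a ≤ b) :
    pvPref l b = pvPref l a + (((l.drop a).take (b - a)).map List.length).sum := by
  unfold pvPref
  have h : b = a + (b - a) := by omega
  rw [h, List.take_add, List.map_append, List.sum_append, Nat.add_sub_cancel_left]


-- the foldl prefix-table loop of B computes pvPref at every index
theorem pv_offsets_spec (l : List (List Char)) :
    (l.foldl (fun (st : Nat × List Nat) ln => (st.1 + ln.length, st.2 ++ [st.1 + ln.length])) (0, [0])).2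
      = (List.range (l.length + 1)).map (pvPref l) := by
  have gen : ∀ (l : List (List Char)) (t : Nat) (acc : List Nat),
      (l.foldl (fun (st : Nat × List Nat) ln => (st.1 + ln.length, st.2 ++ [st.1 + ln.length])) (t, acc))
        = (t + pvPref l l.length, acc ++ (List.range l.length).map (fun k => t + pvPref l (k + 1))) := by
    intro l
    induction l with
    | nil => intro t acc; simp [pvPref]
    | cons a rest ih =>
      intro t acc
      simp only [List.foldl_cons, ih, Prod.mk.injEq]
      refine ⟨by simp [pvPref, Nat.add_assoc], ?_⟩
      rw [List.length_cons, List.range_succ_eq_map]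
      simp [List.map_cons, List.map_map, List.append_assoc, pvPref]
      omega
  rw [gen, List.range_succ_eq_map]
  simp [List.map_cons, List.map_map, pvPref]


-- A's generator-sum of line lengths is pvPref
theorem pv_sum_range_pref (l : List (List Char)) (n : Nat) (hn : n ≤ l.length) :
    ((List.range n).map (fun i => ((l.getD i []).length : Int))).sum = (pvPref l n : Int) := by
  induction n with
  | zero => simp [pvPref]
  | succ m ih =>
    rw [List.range_succ, List.map_append, List.sum_append]
    rw [ih (by omega), pvPref_succ l m (by omega)]
    push_cast
    simp


-- slicing the flattened lines at pvPref boundaries is flattening a sublist of lines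
theorem pv_flatten_slice (ls : List (List Char)) (a b : Nat) (ha : a ≤ b) :
    PySem.List.slice ls.flatten (some ((pvPref ls a : Nat) : Int)) (some ((pvPref ls b : Nat) : Int))
      = ((ls.drop a).take (b - a)).flatten := by
  rw [PySem.List.slice_natCast]
  have h1 : ls.flatten = (ls.take a).flatten ++ (ls.drop a).flatten := by
    rw [← List.flatten_append, List.take_append_drop]
  have hpa : pvPref ls a = (ls.take a).flatten.length := by
    rw [List.length_flatten]; rfl
  rw [h1, hpa, List.drop_left]
  have h2 : (ls.drop a).flatten = ((ls.drop a).take (b - a)).flatten ++ ((ls.drop a).drop (b - a)).flatten := by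
    rw [← List.flatten_append, List.take_append_drop]
  have hlen : ((ls.drop a).take (b - a)).flatten.length = pvPref ls b - pvPref ls a := by
    rw [List.length_flatten, pvPref_sub ls a b ha]
    omega
  rw [h2, ← hpa]
  have h3 : pvPref ls b - pvPref ls a = ((ls.drop a).take (b - a)).flatten.length := hlen.symm
  rw [h3, List.take_left]


-- the two ports agree on every input admitted by Pre_
theorem pv_ports_agree (content : String) (selector : List (String × Int))
    (hpre : PySem.Dict.getD ⟨selector⟩ "start" 1 - 1 ≤ ((pvNumLines content.toList : Nat) : Int)) :
    apply_region_selector_py content selector = apply_region_selector_py_alt content selector := by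
  simp only [apply_region_selector_py, apply_region_selector_py_alt]
  set cs := content.toList with hcs
  set st := PySem.Dict.getD (⟨selector⟩ : PySem.Dict String Int) "start" 1 with hst
  set en := PySem.Dict.getD (⟨selector⟩ : PySem.Dict String Int) "end" (-1) with hen
  rw [pvNumLines_eq] at hpre
  set ls := pvSplitlinesK cs with hls
  -- names
  set sN : Nat := (max 0 (st - 1)).toNat with hsN
  have hs_cast : ((sN : Nat) : Int) = max 0 (st - 1) := Int.toNat_of_nonneg (le_max_left 0 _)
  have hsL : sN ≤ ls.length := by omega
  set eN : Nat := (if en = -1 then ls.length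
                   else if en < 0 then ((ls.length : Int) + en).toNat
                   else (min en (ls.length : Int)).toNat) with heN
  have heL : eN ≤ ls.length := by
    rw [heN]; split_ifs <;> omega
  set e2 : Nat := max sN eN with he2
  have he2L : e2 ≤ ls.length := by omega
  -- slice on lines reduces to drop/take at sN, eN
  have hclampA : PySem.List.clampIdx ls.length (max 0 (st - 1)) = sN := by
    unfold PySem.List.clampIdx
    split_ifs <;> omega
  have hclampB : PySem.List.clampIdx ls.length
      (if en = -1 then (ls.length : Int) else min en (ls.length : Int)) = eN := by
    unfold PySem.List.clampIdx
    rw [heN]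
    split_ifs <;> omega
  have hslice : PySem.List.slice ls (some (max 0 (st - 1)))
      (some (if en = -1 then (ls.length : Int) else min en (ls.length : Int)))
      = (ls.drop sN).take (eN - sN) := by
    simp only [PySem.List.slice, hclampA, hclampB]
  -- A char_start = pvPref ls sN
  have hcsA : ((PySem.List.pyRange 0 (max 0 (st - 1))).map
      (fun i => ((PySem.List.pyGetD ls i []).length : Int))).sum = (pvPref ls sN : Int) := by
    rw [← hs_cast, PySem.List.pyRange_zero_natCast, List.map_map]
    have : ((fun i => ((PySem.List.pyGetD ls i []).length : Int)) ∘ fun k : Nat => (k : Int))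
        = fun i : Nat => ((ls.getD i []).length : Int) := by
      funext i
      simp [PySem.List.pyGetD_natCast]
    rw [this, pv_sum_range_pref ls sN hsL]
  -- B offsets lookups
  have hoffs : (ls.foldl (fun (st : Nat × List Nat) ln => (st.1 + ln.length, st.2 ++ [st.1 + ln.length])) (0, [0])).2
      = (List.range (ls.length + 1)).map (pvPref ls) := pv_offsets_spec ls
  have hgetS : PySem.List.pyGetD ((ls.foldl (fun (st : Nat × List Nat) ln => (st.1 + ln.length, st.2 ++ [st.1 + ln.length])) (0, [0])).2) ((sN : Nat) : Int) 0 = pvPref ls sN := by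
    rw [hoffs, PySem.List.pyGetD_natCast, PySem.List.getD_map_range _ _ _ _ (by omega)]
  have hgetE : PySem.List.pyGetD ((ls.foldl (fun (st : Nat × List Nat) ln => (st.1 + ln.length, st.2 ++ [st.1 + ln.length])) (0, [0])).2) ((e2 : Nat) : Int) 0 = pvPref ls e2 := by
    rw [hoffs, PySem.List.pyGetD_natCast, PySem.List.getD_map_range _ _ _ _ (by omega)]
  -- selected content
  have hsel : PySem.Chars.join [] (PySem.List.slice ls (some (max 0 (st - 1)))
      (some (if en = -1 then (ls.length : Int) else min en (ls.length : Int))))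
      = ((ls.drop sN).take (e2 - sN)).flatten := by
    rw [hslice, pv_join_nil_flatten]
    have : eN - sN = e2 - sN := by omega
    rw [this]
  have hselB : PySem.List.slice cs (some ((pvPref ls sN : Nat) : Int)) (some ((pvPref ls e2 : Nat) : Int))
      = ((ls.drop sN).take (e2 - sN)).flatten := by
    have hflat : cs = ls.flatten := (pvSplitlinesK_flatten cs).symm
    calc PySem.List.slice cs (some ((pvPref ls sN : Nat) : Int)) (some ((pvPref ls e2 : Nat) : Int))
        = PySem.List.slice ls.flatten (some ((pvPref ls sN : Nat) : Int)) (some ((pvPref ls e2 : Nat) : Int)) := by rw [← hflat]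
      _ = ((ls.drop sN).take (e2 - sN)).flatten := pv_flatten_slice ls sN e2 (by omega)
  -- char_end of A
  have hlenSel : (((ls.drop sN).take (e2 - sN)).flatten.length : Int) = (pvPref ls e2 : Int) - (pvPref ls sN : Int) := by
    rw [List.length_flatten]
    have := pvPref_sub ls sN e2 (by omega)
    omega
  rw [hsel, hcsA, hgetS, hgetE, hselB]
  simp only [Prod.mk.injEq]
  refine ⟨trivial, trivial, ?_⟩
  omega

-- ===== VERDICT (by name: the statement is the Claim_ definition above) =====
theorem apply_region_selector_py_spec : Claim_equal_apply_region_selector_py := by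
  intro content selector _hdom hpre
  exact pv_ports_agree content selector hpre
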